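-- pv_equiv track=rewrite | github.com/danieleschmidt/causal-interface-gym | src/causal_interface_gym/testing/quality_gates.py | _get_dependency_recommendations
-- ===== SOURCE A (Python) =====
-- from typing import Dict, List, Any, Optional, Tuple, Callable
--
-- def _get_dependency_recommendations(issues: List[str]) -> List[str]:
--     """Get dependency management recommendations."""
--     recommendations = []
--
--     if any('vulnerable' in issue.lower() for issue in issues):
--         recommendations.append("Update vulnerable dependencies immediately")
--         recommendations.append("Set up automated dependency vulnerability scanning")
--
--     if any('outdated' in issue.lower() for issue in issues):
--         recommendations.append("Review and update outdated dependencies")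
--
--     return recommendations
-- ===== SOURCE B (Python) =====
-- def _get_dependency_recommendations(issues):
--     """Get dependency management recommendations (single pass over issues)."""
--     has_vulnerable = False
--     has_outdated = False
--     for issue in issues:
--         low = issue.lower()
--         if 'vulnerable' in low:
--             has_vulnerable = True
--         if 'outdated' in low:
--             has_outdated = True
--         if has_vulnerable and has_outdated:
--             break
--     recommendations = []
--     if has_vulnerable:
--         recommendations.append("Update vulnerable dependencies immediately")
--         recommendations.append("Set up automated dependency vulnerability scanning")
--     if has_outdated:
--         recommendations.append("Review and update outdated dependencies")
--     return recommendations
-- ===== Notes on version B (the rewrite author's own statement) =====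
-- stated objective: alternative
-- what changed: Replaces the two separate any(...) generator scans (each lowercasing every issue) with one explicit loop that lowercases each issue once, sets two boolean flags and breaks early once both are set, then builds the recommendation list from the flags.
import Mathlib
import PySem

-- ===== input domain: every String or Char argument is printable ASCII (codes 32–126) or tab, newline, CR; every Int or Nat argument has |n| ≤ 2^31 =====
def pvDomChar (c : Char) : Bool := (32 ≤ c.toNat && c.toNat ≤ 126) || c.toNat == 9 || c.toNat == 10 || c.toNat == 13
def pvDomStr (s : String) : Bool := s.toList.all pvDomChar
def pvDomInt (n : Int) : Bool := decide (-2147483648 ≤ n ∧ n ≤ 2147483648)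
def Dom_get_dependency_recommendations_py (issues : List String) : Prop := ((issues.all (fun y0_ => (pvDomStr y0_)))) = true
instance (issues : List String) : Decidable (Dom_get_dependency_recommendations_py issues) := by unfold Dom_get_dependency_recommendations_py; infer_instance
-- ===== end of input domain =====

-- B replaces A's two separate any(...) scans by one loop setting two flags (early break); same values.

-- ===== PORT A =====
def get_dependency_recommendations_py (issues : List String) : List String :=
  let recommendations : List String := []
  let recommendations :=
    if issues.any (fun issue => PySem.Str.isIn "vulnerable" (PySem.Str.lower issue)) then
      recommendations ++ ["Update vulnerable dependencies immediately",
                          "Set up automated dependency vulnerability scanning"]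
    else recommendations
  let recommendations :=
    if issues.any (fun issue => PySem.Str.isIn "outdated" (PySem.Str.lower issue)) then
      recommendations ++ ["Review and update outdated dependencies"]
    else recommendations
  recommendations

-- ===== PORT B =====
-- the single-pass flag loop of Source B, with the early break
def pvScanFlags : List String → Bool → Bool → Bool × Bool
  | [], hv, ho => (hv, ho)
  | issue :: rest, hv, ho =>
    let low := PySem.Str.lower issue
    let hv := if PySem.Str.isIn "vulnerable" low then true else hv
    let ho := if PySem.Str.isIn "outdated" low then true else ho
    if hv && ho then (hv, ho) else pvScanFlags rest hv ho

def get_dependency_recommendations_py_alt (issues : List String) : List String :=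
  let flags := pvScanFlags issues false false
  let recommendations : List String := []
  let recommendations :=
    if flags.1 then
      recommendations ++ ["Update vulnerable dependencies immediately",
                          "Set up automated dependency vulnerability scanning"]
    else recommendations
  let recommendations :=
    if flags.2 then
      recommendations ++ ["Review and update outdated dependencies"]
    else recommendations
  recommendations

-- ===== PRECONDITION & SPEC =====
def Spec_get_dependency_recommendations_py (issues : List String) (out : List String) : Prop := out = get_dependency_recommendations_py_alt issues
instance (issues : List String) (out : List String) : Decidable (Spec_get_dependency_recommendations_py issues out) := by unfold Spec_get_dependency_recommendations_py; infer_instance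

-- ===== CLAIM (what is proved, stated in full; the proofs are below) =====
def Claim_equal_get_dependency_recommendations_py : Prop := ∀ (issues : List String), Dom_get_dependency_recommendations_py issues → Spec_get_dependency_recommendations_py issues (get_dependency_recommendations_py issues)

-- ===== LEMMAS AND PROOFS =====
-- The flag loop computes exactly the two any-scans (the break only fires when both flags are already true).
theorem pvScanFlags_eq (issues : List String) (hv ho : Bool) :
    pvScanFlags issues hv ho =
      (hv || issues.any (fun issue => PySem.Str.isIn "vulnerable" (PySem.Str.lower issue)),
       ho || issues.any (fun issue => PySem.Str.isIn "outdated" (PySem.Str.lower issue))) := by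
  induction issues generalizing hv ho with
  | nil => simp [pvScanFlags]
  | cons issue rest ih =>
    cases hv <;> cases ho <;>
      by_cases ha : PySem.Str.isIn "vulnerable" (PySem.Str.lower issue) = true <;>
      by_cases hb : PySem.Str.isIn "outdated" (PySem.Str.lower issue) = true <;>
        simp [pvScanFlags, ha, hb, ih] <;>
          first
            | (intro h1 h2; exact ⟨fun _ _ _ => h1, fun _ _ _ => h2⟩)
            | (intro h; exact fun _ _ _ => h)

-- ===== VERDICT (by name: the statement is the Claim_ definition above) =====
theorem get_dependency_recommendations_py_spec : Claim_equal_get_dependency_recommendations_py := by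
  intro issues _
  unfold Spec_get_dependency_recommendations_py
  unfold get_dependency_recommendations_py get_dependency_recommendations_py_alt
  rw [pvScanFlags_eq]
  rfl
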